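-- pv_equiv track=rewrite | github.com/DaddyFlash1/Vendex-Blacklist-DC | FXbot.py | is_capslock
-- ===== SOURCE A (Python) =====
-- CAPSLOCK_THRESHOLD = 5
--
-- def is_capslock(content):
--     consecutive_uppercase = 0
--     for char in content:
--         if char.isupper():
--             consecutive_uppercase += 1
--             if consecutive_uppercase >= CAPSLOCK_THRESHOLD:
--                 return True
--         else:
--             consecutive_uppercase = 0
--     return False
-- ===== SOURCE B (Python) =====
-- CAPSLOCK_THRESHOLD = 5
--
-- def is_capslock(content):
--     # sliding-window formulation: some length-5 window is entirely uppercase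
--     return any(all(ch.isupper() for ch in content[i:i + CAPSLOCK_THRESHOLD])
--                for i in range(len(content) - CAPSLOCK_THRESHOLD + 1))
-- ===== Notes on version B (the rewrite author's own statement) =====
-- stated objective: alternative
-- what changed: Replaced the reset-on-miss running counter with early return by a sliding-window test: enumerate every start index and check whether the length-5 slice starting there is entirely uppercase.
import Mathlib
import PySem

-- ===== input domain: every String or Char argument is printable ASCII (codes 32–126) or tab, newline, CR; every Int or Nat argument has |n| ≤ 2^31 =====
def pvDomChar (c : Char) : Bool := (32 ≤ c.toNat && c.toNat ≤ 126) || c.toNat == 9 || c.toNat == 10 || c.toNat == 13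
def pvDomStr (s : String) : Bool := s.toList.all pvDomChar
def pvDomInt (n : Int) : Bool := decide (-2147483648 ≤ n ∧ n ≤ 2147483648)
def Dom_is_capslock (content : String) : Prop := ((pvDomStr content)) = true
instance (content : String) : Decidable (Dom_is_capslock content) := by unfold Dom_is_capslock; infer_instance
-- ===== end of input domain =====

-- B replaces A's reset-on-miss counter with a sliding-window test: some length-5
-- slice of the string is entirely uppercase (alternative decomposition, same cost).

-- ===== PORT A =====
-- A's loop: counter of consecutive uppercase chars, early return at the threshold 5
def capsGo : List Char → Nat → Bool
  | [], _ => false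
  | c :: rest, k =>
    if PySem.Chars.isupper c then
      if k + 1 ≥ 5 then true else capsGo rest (k + 1)
    else capsGo rest 0

def is_capslock (content : String) : Bool := capsGo content.toList 0

-- ===== PORT B =====
-- any(all(ch.isupper() for ch in content[i:i+5]) for i in range(len(content) - 5 + 1))
def is_capslock_alt (content : String) : Bool :=
  (PySem.List.pyRange 0 ((content.toList.length : Int) - 5 + 1) 1).any
    (fun i => (PySem.List.slice content.toList (some i) (some (i + 5))).all PySem.Chars.isupper)

-- ===== PRECONDITION & SPEC =====
def Spec_is_capslock (content : String) (out : Bool) : Prop := out = is_capslock_alt content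
instance (content : String) (out : Bool) : Decidable (Spec_is_capslock content out) := by unfold Spec_is_capslock; infer_instance

-- ===== CLAIM (what is proved, stated in full; the proofs are below) =====
def Claim_equal_is_capslock : Prop := ∀ (content : String), Dom_is_capslock content → Spec_is_capslock content (is_capslock content)

-- ===== LEMMAS AND PROOFS =====

/-- length of the maximal uppercase prefix -/
def upPrefix : List Char → Nat
  | [] => 0
  | c :: r => if PySem.Chars.isupper c then upPrefix r + 1 else 0

/-- "some length-5 window is entirely uppercase" -/
def W (l : List Char) : Prop :=
  ∃ i, i + 5 ≤ l.length ∧ ((l.drop i).take 5).all PySem.Chars.isupper = true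

lemma upPrefix_ge_iff : ∀ (l : List Char) (k : Nat),
    upPrefix l ≥ k ↔ k ≤ l.length ∧ (l.take k).all PySem.Chars.isupper = true
  | [], k => by cases k <;> simp [upPrefix]
  | c :: r, k => by
    cases k with
    | zero => simp
    | succ m =>
      by_cases hc : PySem.Chars.isupper c = true
      · simp only [upPrefix, hc, if_pos, List.take_succ_cons, List.all_cons,
          List.length_cons, Bool.true_and]
        rw [show upPrefix r + 1 ≥ m + 1 ↔ upPrefix r ≥ m by omega,
          upPrefix_ge_iff r m]
        constructor <;> rintro ⟨h1, h2⟩ <;> exact ⟨by omega, h2⟩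
      · simp only [upPrefix, hc, List.take_succ_cons, List.all_cons,
          List.length_cons, Bool.false_eq_true]
        simp

lemma W_of_upPrefix (l : List Char) (h : upPrefix l ≥ 5) : W l := by
  rw [upPrefix_ge_iff] at h
  exact ⟨0, by simpa using h.1, by simpa using h.2⟩

lemma W_cons (c : Char) (r : List Char) :
    W (c :: r) ↔ upPrefix (c :: r) ≥ 5 ∨ W r := by
  constructor
  · rintro ⟨i, hi, hall⟩
    cases i with
    | zero =>
      left
      rw [upPrefix_ge_iff]
      exact ⟨by simpa using hi, by simpa using hall⟩
    | succ j =>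
      right
      exact ⟨j, by simpa using hi, by simpa using hall⟩
  · rintro (h | ⟨j, hj, hall⟩)
    · exact W_of_upPrefix _ h
    · exact ⟨j + 1, by simpa using hj, by simpa using hall⟩

lemma capsGo_iff : ∀ (l : List Char) (k : Nat), k ≤ 4 →
    (capsGo l k = true ↔ k + upPrefix l ≥ 5 ∨ W l)
  | [], k, hk => by
    simp only [capsGo, upPrefix, W, List.length_nil, Bool.false_eq_true]
    constructor
    · intro h; exact absurd h (by simp)
    · rintro (h | ⟨i, hi, _⟩) <;> omega
  | c :: rest, k, hk => by
    by_cases hc : PySem.Chars.isupper c = true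
    · by_cases h4 : k + 1 ≥ 5
      · have hA : capsGo (c :: rest) k = true := by simp [capsGo, hc, h4]
        rw [hA]
        simp only [upPrefix, hc, if_pos]
        constructor
        · intro _; left; omega
        · intro _; trivial
      · have hstep : capsGo (c :: rest) k = capsGo rest (k + 1) := by
          simp [capsGo, hc, h4]
        rw [hstep, capsGo_iff rest (k + 1) (by omega), W_cons]
        simp only [upPrefix, hc, if_pos]
        constructor
        · rintro (h | h)
          · left; omega
          · right; right; exact h
        · rintro (h | h | h)
          · left; omega
          · left; omega
          · right; exact h
    · simp only [Bool.not_eq_true] at hc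
      have hstep : capsGo (c :: rest) k = capsGo rest 0 := by simp [capsGo, hc]
      rw [hstep, capsGo_iff rest 0 (by omega), W_cons]
      simp only [upPrefix, hc, Bool.false_eq_true, if_false]
      constructor
      · rintro (h | h)
        · right; right; exact W_of_upPrefix rest (by omega)
        · right; right; exact h
      · rintro (h | h | h)
        · omega
        · omega
        · right; exact h

lemma alt_iff (content : String) : is_capslock_alt content = true ↔ W content.toList := by
  unfold is_capslock_alt
  rw [List.any_eq_true]
  constructor
  · rintro ⟨i, hmem, hall⟩
    rw [PySem.List.mem_pyRange_one] at hmem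
    obtain ⟨h0, hlt⟩ := hmem
    lift i to ℕ using h0 with j
    refine ⟨j, by omega, ?_⟩
    rwa [show (j : Int) + 5 = ((j : ℕ) : Int) + ((5 : ℕ) : Int) by push_cast; ring,
      PySem.List.slice_natCast_add] at hall
  · rintro ⟨j, hj, hall⟩
    refine ⟨(j : Int), ?_, ?_⟩
    · rw [PySem.List.mem_pyRange_one]
      constructor <;> [positivity; omega]
    · rwa [show (j : Int) + 5 = ((j : ℕ) : Int) + ((5 : ℕ) : Int) by push_cast; ring,
        PySem.List.slice_natCast_add]

-- ===== VERDICT (by name: the statement is the Claim_ definition above) =====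
theorem is_capslock_spec : Claim_equal_is_capslock := by
  intro content _
  show is_capslock content = is_capslock_alt content
  rw [Bool.eq_iff_iff]
  unfold is_capslock
  rw [capsGo_iff content.toList 0 (by omega), alt_iff]
  constructor
  · rintro (h | h)
    · exact W_of_upPrefix _ (by omega)
    · exact h
  · intro h; right; exact h
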